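-- pv_equiv track=rewrite | github.com/Sneha-Poojary/python-dev-diary | Array/reverse_with_group.py | reverse_group
-- ===== SOURCE A (Python) =====
-- def reverse_group (arr,k):
--     n = len(arr)
--     for i in range(0,n,k):
--         start = i
--         end = min(i+k-1, n-1)
--         while start < end:
--             arr[start],arr[end] = arr[end],arr[start]
--             start +=1
--             end -=1
--     return arr
-- ===== SOURCE B (Python) =====
-- def reverse_group(arr, k):
--     out = []
--     for i in range(0, len(arr), k):
--         out += arr[i:i+k][::-1]
--     arr[:len(out)] = out
--     return arr
-- ===== Notes on version B (the rewrite author's own statement) =====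
-- stated objective: alternative
-- what changed: B builds a fresh output by concatenating reversed k-slices into an accumulator and assigns it back, instead of A's in-place two-pointer swapping inside each group.
import Mathlib
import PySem

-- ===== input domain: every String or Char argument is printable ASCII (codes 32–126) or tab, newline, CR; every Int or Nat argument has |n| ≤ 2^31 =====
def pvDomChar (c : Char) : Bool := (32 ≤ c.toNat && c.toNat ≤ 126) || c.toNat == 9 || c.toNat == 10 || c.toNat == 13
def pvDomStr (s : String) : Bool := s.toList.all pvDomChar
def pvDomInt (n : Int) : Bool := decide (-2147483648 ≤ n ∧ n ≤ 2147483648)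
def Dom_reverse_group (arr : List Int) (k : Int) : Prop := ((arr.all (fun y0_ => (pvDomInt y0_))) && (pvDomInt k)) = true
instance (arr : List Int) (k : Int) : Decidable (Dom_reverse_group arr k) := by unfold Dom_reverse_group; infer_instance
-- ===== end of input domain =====

-- B builds a fresh output list by concatenating reversed k-slices into an accumulator and writes it
-- back, instead of A's in-place two-pointer swapping inside each group; equal return value (in
-- Python both also leave arr itself in the same final state; the Lean ports are about the value).

-- ===== PORT A =====
-- inner while loop: arr[start],arr[end] = arr[end],arr[start]; start += 1; end -= 1
-- (pyGetD/pySetD are exact here: every call reached from reverse_group has 0 ≤ s and e < a.length)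
def swapLoop (a : List Int) (s e : Int) : List Int :=
  if _h : s < e then
    swapLoop (PySem.List.pySetD (PySem.List.pySetD a s (PySem.List.pyGetD a e 0)) e
                (PySem.List.pyGetD a s 0)) (s + 1) (e - 1)
  else a
termination_by (e - s).toNat
decreasing_by omega

def reverse_group (arr : List Int) (k : Int) : List Int :=
  (PySem.List.pyRange 0 (arr.length : Int) k).foldl
    (fun a i => swapLoop a i (min (i + k - 1) ((arr.length : Int) - 1))) arr

-- ===== PORT B =====
def reverse_group_alt (arr : List Int) (k : Int) : List Int :=
  let out := (PySem.List.pyRange 0 (arr.length : Int) k).foldl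
      (fun acc i => acc ++ (PySem.List.slice arr (some i) (some (i + k))).reverse) []
  -- arr[:len(out)] = out; return arr
  out ++ arr.drop out.length

-- ===== PRECONDITION & SPEC =====
-- Pre_ excludes only k = 0, where range(0, len(arr), 0) raises ValueError (in A and in B alike).
def Pre_reverse_group (arr : List Int) (k : Int) : Prop := k ≠ 0
instance (arr : List Int) (k : Int) : Decidable (Pre_reverse_group arr k) := by
  unfold Pre_reverse_group; infer_instance

def pvWitness_reverse_group : List Int × Int := ([1, 2, 3, 4, 5], 2)

def Spec_reverse_group (arr : List Int) (k : Int) (out : List Int) : Prop := out = reverse_group_alt arr k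
instance (arr : List Int) (k : Int) (out : List Int) : Decidable (Spec_reverse_group arr k out) := by unfold Spec_reverse_group; infer_instance

-- ===== CLAIM (what is proved, stated in full; the proofs are below) =====
def Claim_equal_reverse_group : Prop := ∀ (arr : List Int) (k : Int), Dom_reverse_group arr k → Pre_reverse_group arr k → Spec_reverse_group arr k (reverse_group arr k)

-- ===== LEMMAS AND PROOFS =====

lemma pyRange_neg_nil (a b k : Int) (hk : k < 0) (hab : a ≤ b) :
    PySem.List.pyRange a b k = [] := by
  unfold PySem.List.pyRange
  rw [if_neg (by omega)]
  simp only
  rw [if_neg (by omega), if_neg (by omega)]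
  simp

lemma pyGetD_at_len (P rest : List Int) (x : Int) :
    PySem.List.pyGetD (P ++ x :: rest) (P.length : Int) 0 = x := by
  simp [PySem.List.pyGetD_natCast, List.getD_eq_getElem?_getD]

lemma pySetD_at_len (P rest : List Int) (x v : Int) :
    PySem.List.pySetD (P ++ x :: rest) (P.length : Int) v = P ++ v :: rest := by
  rw [PySem.List.pySetD_natCast, List.set_append, if_neg (by omega)]
  simp

lemma swapLoop_core (n : Nat) : ∀ (M P S : List Int) (x y : Int), M.length = n →
    swapLoop (P ++ x :: (M ++ y :: S)) (P.length : Int) ((P.length : Int) + M.length + 1)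
      = P ++ y :: (M.reverse ++ x :: S) := by
  induction n using Nat.strong_induction_on with
  | _ n ih =>
    intro M P S x y hn
    rw [swapLoop, dif_pos (by omega)]
    -- index e rewritten through the decomposition (P ++ x :: M) ++ y :: S
    have hsplit : P ++ x :: (M ++ y :: S) = (P ++ x :: M) ++ y :: S := by simp
    have hcast : (P.length : Int) + M.length + 1 = (((P ++ x :: M).length : Nat) : Int) := by
      simp; ring
    have hget_e : PySem.List.pyGetD (P ++ x :: (M ++ y :: S)) ((P.length : Int) + M.length + 1) 0 = y := by
      rw [hsplit, hcast, pyGetD_at_len]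
    have hget_s : PySem.List.pyGetD (P ++ x :: (M ++ y :: S)) (P.length : Int) 0 = x := by
      rw [pyGetD_at_len]
    rw [hget_e, hget_s, pySetD_at_len]
    have hset_e : PySem.List.pySetD (P ++ y :: (M ++ y :: S)) ((P.length : Int) + M.length + 1) x
        = (P ++ y :: M) ++ x :: S := by
      have h2 : P ++ y :: (M ++ y :: S) = (P ++ y :: M) ++ y :: S := by simp
      have hc2 : (P.length : Int) + M.length + 1 = (((P ++ y :: M).length : Nat) : Int) := by
        simp; ring
      rw [h2, hc2, pySetD_at_len]
    rw [hset_e]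
    match M, hn with
    | [], _ =>
      rw [swapLoop, dif_neg (by simp)]
      simp
    | u :: M'', hn =>
      match hM2 : M''.reverse with
      | [] =>
        have hnil : M'' = [] := by simpa using congrArg List.reverse hM2
        subst hnil
        rw [swapLoop, dif_neg (by simp)]
        simp
      | v :: W =>
        have hMW : M'' = W.reverse ++ [v] := by
          rw [← List.reverse_reverse M'', hM2]; simp
        subst hMW
        have e1 : (P ++ y :: (u :: (W.reverse ++ [v]))) ++ x :: S
            = (P ++ [y]) ++ u :: (W.reverse ++ v :: (x :: S)) := by simp
        have e2 : (P.length : Int) + 1 = ((P ++ [y]).length : Int) := by simp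
        have e3 : (P.length : Int) + ((u :: (W.reverse ++ [v])).length : Int) + 1 - 1
            = ((P ++ [y]).length : Int) + ((W.reverse).length : Int) + 1 := by
          simp; ring
        rw [e1, e2, e3, ih W.reverse.length (by simp at hn ⊢; omega) W.reverse (P ++ [y]) (x :: S) u v rfl]
        simp

lemma exists_cons_append_singleton (l : List Int) (h : 2 ≤ l.length) :
    ∃ x M y, l = x :: M ++ [y] := by
  match l with
  | x :: r =>
    have hr : r ≠ [] := by intro e; subst e; simp at h
    exact ⟨x, r.dropLast, r.getLast hr, by rw [List.cons_append, List.dropLast_append_getLast hr]⟩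

lemma swapLoop_seg (a : List Int) (j L : Nat) (hL : 1 ≤ L) (hjL : j + L ≤ a.length) :
    swapLoop a (j : Int) ((j : Int) + L - 1)
      = a.take j ++ ((a.drop j).take L).reverse ++ a.drop (j + L) := by
  have hdd : (a.drop j).drop L = a.drop (j + L) := by rw [List.drop_drop]
  have hseg : a = a.take j ++ ((a.drop j).take L ++ a.drop (j + L)) := by
    conv_lhs => rw [← List.take_append_drop j a, ← List.take_append_drop L (a.drop j)]
    rw [hdd]
  have hsegLen : ((a.drop j).take L).length = L := by rw [List.length_take, List.length_drop]; omega
  by_cases h1 : L = 1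
  · subst h1
    rw [swapLoop, dif_neg (by omega)]
    conv_lhs => rw [hseg]
    have : ((a.drop j).take 1).reverse = (a.drop j).take 1 := by
      match h : (a.drop j).take 1 with
      | [] => simp
      | [z] => simp
      | z :: w :: r => have := List.length_take_le 1 (a.drop j); rw [h] at this; simp at this
    rw [this, List.append_assoc]
  · obtain ⟨x, M, y, hxy⟩ := exists_cons_append_singleton _ (by omega : 2 ≤ ((a.drop j).take L).length)
    have hMlen : M.length = L - 2 := by
      have := congrArg List.length hxy; rw [hsegLen] at this; simp at this; omega
    have hlist : a = a.take j ++ x :: (M ++ y :: a.drop (j + L)) := by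
      conv_lhs => rw [hseg]
      rw [hxy]; simp
    have hidx1 : (j : Int) = ((a.take j).length : Int) := by simp; omega
    have hidx2 : ((a.take j).length : Int) + L - 1 = ((a.take j).length : Int) + (M.length : Int) + 1 := by
      rw [hMlen]; push_cast [Nat.cast_sub (by omega : 2 ≤ L)]; omega
    conv_lhs => rw [hlist, hidx1, hidx2]
    rw [swapLoop_core M.length M (a.take j) (a.drop (j + L)) x y rfl, hxy]
    simp

def chunkRev (kn : Nat) (a : List Int) : List Int :=
  match a with
  | [] => []
  | x :: r => (x :: r.take (kn - 1)).reverse ++ chunkRev kn (r.drop (kn - 1))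
termination_by a.length
decreasing_by simp

lemma chunkRev_nil (kn : Nat) : chunkRev kn [] = [] := by rw [chunkRev]

lemma chunkRev_eq (kn : Nat) (hk : 1 ≤ kn) (l : List Int) (hl : l ≠ []) :
    chunkRev kn l = (l.take kn).reverse ++ chunkRev kn (l.drop kn) := by
  match l with
  | [] => exact absurd rfl hl
  | x :: r =>
    rw [chunkRev]
    have h1 : (x :: r).take kn = x :: r.take (kn - 1) := by
      obtain ⟨m, rfl⟩ := Nat.exists_eq_add_of_le hk; simp [Nat.add_comm]
    have h2 : (x :: r).drop kn = r.drop (kn - 1) := by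
      obtain ⟨m, rfl⟩ := Nat.exists_eq_add_of_le hk; simp [Nat.add_comm]
    rw [h1, h2]

lemma pyRange_pos_nil (a b k : Int) (hk : 0 < k) (hab : b ≤ a) :
    PySem.List.pyRange a b k = [] := by
  rw [PySem.List.pyRange_of_pos _ _ hk, if_neg (by omega)]; simp

lemma pyRange_pos_cons (a b k : Int) (hk : 0 < k) (hab : a < b) :
    PySem.List.pyRange a b k = a :: PySem.List.pyRange (a + k) b k := by
  rw [PySem.List.pyRange_of_pos _ _ hk, PySem.List.pyRange_of_pos _ _ hk]
  rw [if_pos hab]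
  by_cases h2 : a + k < b
  · rw [if_pos h2]
    have hcnt : ((b - a + k - 1) / k).toNat = ((b - (a+k) + k - 1) / k).toNat + 1 := by
      have : b - a + k - 1 = (b - (a+k) + k - 1) + 1 * k := by ring
      rw [this, Int.add_mul_ediv_right _ _ (by omega)]
      have h1 : 0 ≤ (b - (a+k) + k - 1) / k := Int.ediv_nonneg (by omega) (by omega)
      omega
    rw [hcnt, List.range_succ_eq_map]
    simp [List.map_map, Function.comp]
    intro t _; ring
  · rw [if_neg h2]
    have hq : (b - a + k - 1) / k = 1 := by
      have h1 : 1 ≤ (b - a + k - 1) / k := by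
        rw [Int.le_ediv_iff_mul_le (by omega)]; omega
      have h2' : (b - a + k - 1) / k < 2 := by
        rw [Int.ediv_lt_iff_lt_mul (by omega)]; omega
      omega
    rw [hq]
    simp

lemma foldA (k n : Int) (hk : 0 < k) : ∀ (d : Nat) (a : List Int) (j : Int), 0 ≤ j →
    n = a.length → d = (n - j).toNat →
    (PySem.List.pyRange j n k).foldl (fun b i => swapLoop b i (min (i + k - 1) (n - 1))) a
      = a.take j.toNat ++ chunkRev k.toNat (a.drop j.toNat) := by
  intro d
  induction d using Nat.strong_induction_on with
  | _ d ih =>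
    intro a j hj hn hd
    by_cases hjn : n ≤ j
    · rw [pyRange_pos_nil _ _ _ hk hjn]
      have h1 : a.length ≤ j.toNat := by omega
      rw [List.foldl_nil, List.take_of_length_le h1, List.drop_eq_nil_of_le h1, chunkRev_nil,
        List.append_nil]
    · rw [not_le] at hjn
      obtain ⟨jN, rfl⟩ : ∃ jN : Nat, j = (jN : Int) := ⟨j.toNat, by omega⟩
      rw [pyRange_pos_cons _ _ _ hk hjn, List.foldl_cons]
      have hL1 : 1 ≤ min k.toNat (a.length - jN) := by omega
      have hjL : jN + min k.toNat (a.length - jN) ≤ a.length := by omega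
      have he : min ((jN : Int) + k - 1) (n - 1)
          = (jN : Int) + ((min k.toNat (a.length - jN) : Nat) : Int) - 1 := by omega
      rw [he, swapLoop_seg a jN (min k.toNat (a.length - jN)) hL1 hjL]
      have hu : (a.take jN ++ ((a.drop jN).take (min k.toNat (a.length - jN))).reverse).length
          = jN + min k.toNat (a.length - jN) := by simp; omega
      have hlen' : (a.take jN ++ ((a.drop jN).take (min k.toNat (a.length - jN))).reverse
          ++ a.drop (jN + min k.toNat (a.length - jN))).length = a.length := by simp; omega
      have ihres := ih (n - ((jN : Int) + k)).toNat (by omega)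
        (a.take jN ++ ((a.drop jN).take (min k.toNat (a.length - jN))).reverse
          ++ a.drop (jN + min k.toNat (a.length - jN))) ((jN : Int) + k) (by omega)
        (by rw [hn, hlen']) rfl
      rw [ihres]
      have htoNat : ((jN : Int) + k).toNat = jN + k.toNat := by omega
      rw [htoNat]
      have hTake : (a.take jN ++ ((a.drop jN).take (min k.toNat (a.length - jN))).reverse
            ++ a.drop (jN + min k.toNat (a.length - jN))).take (jN + k.toNat)
          = a.take jN ++ ((a.drop jN).take (min k.toNat (a.length - jN))).reverse := by
        rw [List.take_append,
          List.take_of_length_le (by rw [hu]; omega), hu]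
        by_cases hc : k.toNat ≤ a.length - jN
        · have hLk : min k.toNat (a.length - jN) = k.toNat := by omega
          simp [hLk]
        · have hdnil : a.drop (jN + min k.toNat (a.length - jN)) = []
            := List.drop_eq_nil_of_le (by omega)
          simp [hdnil]
      have hDrop : (a.take jN ++ ((a.drop jN).take (min k.toNat (a.length - jN))).reverse
            ++ a.drop (jN + min k.toNat (a.length - jN))).drop (jN + k.toNat)
          = a.drop (jN + k.toNat) := by
        rw [List.drop_append,
          List.drop_eq_nil_of_le (by rw [hu]; omega), hu, List.nil_append, List.drop_drop]
        congr 1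
        omega
      have hchunk : chunkRev k.toNat (a.drop jN)
          = ((a.drop jN).take (min k.toNat (a.length - jN))).reverse
            ++ chunkRev k.toNat (a.drop (jN + k.toNat)) := by
        rw [chunkRev_eq k.toNat (by omega) _ (by
          apply List.ne_nil_of_length_pos; simp; omega)]
        congr 1
        · congr 1
          by_cases hc : k.toNat ≤ a.length - jN
          · have hLk : min k.toNat (a.length - jN) = k.toNat := by omega
            rw [hLk]
          · rw [List.take_of_length_le (by simp; omega),
              List.take_of_length_le (by simp; omega)]
        · rw [List.drop_drop, Nat.add_comm]
      simp only [Int.toNat_natCast]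
      rw [hTake, hDrop, hchunk, List.append_assoc]

lemma foldB (k : Int) (hk : 0 < k) (arr : List Int) : ∀ (d : Nat) (j : Int), 0 ≤ j →
    d = ((arr.length : Int) - j).toNat →
    (PySem.List.pyRange j (arr.length : Int) k).flatMap
        (fun i => (PySem.List.slice arr (some i) (some (i + k))).reverse)
      = chunkRev k.toNat (arr.drop j.toNat) := by
  intro d
  induction d using Nat.strong_induction_on with
  | _ d ih =>
    intro j hj hd
    by_cases hjn : (arr.length : Int) ≤ j
    · rw [pyRange_pos_nil _ _ _ hk hjn, List.flatMap_nil,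
        List.drop_eq_nil_of_le (by omega), chunkRev_nil]
    · rw [not_le] at hjn
      rw [pyRange_pos_cons _ _ _ hk hjn, List.flatMap_cons]
      rw [ih ((arr.length : Int) - (j + k)).toNat (by omega) (j + k) (by omega) rfl]
      rw [PySem.List.slice_toNat arr (by omega) (by omega)]
      have h1 : (j + k).toNat - j.toNat = k.toNat := by omega
      have h2 : (j + k).toNat = j.toNat + k.toNat := by omega
      rw [h1, h2]
      rw [chunkRev_eq k.toNat (by omega) (arr.drop j.toNat)
        (by apply List.ne_nil_of_length_pos; simp; omega)]
      rw [List.drop_drop, Nat.add_comm]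

lemma length_chunkRev (kn : Nat) (a : List Int) : (chunkRev kn a).length = a.length := by
  induction a using chunkRev.induct kn with
  | case1 => rw [chunkRev]
  | case2 x r ih =>
    rw [chunkRev]
    simp only [List.length_append, List.length_reverse, List.length_cons, ih,
      List.length_take, List.length_drop]
    omega

-- ===== VERDICT (by name: the statement is the Claim_ definition above) =====
theorem reverse_group_spec : Claim_equal_reverse_group := by
  intro arr k _hdom hk
  unfold Spec_reverse_group reverse_group reverse_group_alt
  rcases lt_trichotomy k 0 with hneg | hzero | hpos
  · have hnil := pyRange_neg_nil 0 arr.length k hneg (by positivity)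
    simp [hnil]
  · exact absurd hzero hk
  · rw [foldA k arr.length hpos ((arr.length : Int) - 0).toNat arr 0 le_rfl rfl rfl,
      PySem.List.foldl_append_eq_flatMap,
      foldB k hpos arr ((arr.length : Int) - 0).toNat 0 le_rfl rfl]
    simp [length_chunkRev, List.drop_eq_nil_of_le]
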